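-- pv_equiv track=rewrite | github.com/TechnionTDK/figure-out | backend/app.py | get_word_indices
-- ===== SOURCE A (Python) =====
-- def get_word_indices(text):
--     words = text.split()
--     indices = []
--     offset = 0
--     for i, word in enumerate(words):
--         indices.append((offset, offset + len(word)))
--         offset += len(word) + 1
--     return indices
-- ===== SOURCE B (Python) =====
-- def get_word_indices(text):
--     # Different algorithm: normalize the text to single spaces, then detect
--     # word runs by a character scan over the normalized string; no word-length
--     # accumulation is performed.
--     joined = " ".join(text.split())
--     indices = []
--     start = None
--     for i, c in enumerate(joined):
--         if c != " ":
--             if start is None: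
--                 start = i
--         elif start is not None:
--             indices.append((start, i))
--             start = None
--     if start is not None:
--         indices.append((start, len(joined)))
--     return indices
-- ===== Notes on version B (the rewrite author's own statement) =====
-- stated objective: alternative
-- what changed: Instead of accumulating word lengths, B normalizes the text to single-space-separated words and finds each word's (start, end) by a character-level run scan over the normalized string.
import Mathlib
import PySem

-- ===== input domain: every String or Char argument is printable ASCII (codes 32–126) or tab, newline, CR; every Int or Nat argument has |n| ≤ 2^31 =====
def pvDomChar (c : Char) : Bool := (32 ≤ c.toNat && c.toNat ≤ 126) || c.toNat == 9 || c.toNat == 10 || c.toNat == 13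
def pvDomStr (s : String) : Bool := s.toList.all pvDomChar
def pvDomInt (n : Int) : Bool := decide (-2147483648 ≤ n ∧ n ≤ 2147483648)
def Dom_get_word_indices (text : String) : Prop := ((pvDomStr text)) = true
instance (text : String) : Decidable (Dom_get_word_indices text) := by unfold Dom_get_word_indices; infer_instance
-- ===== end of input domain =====

-- B finds the word spans by a character-level run scan over the single-space-normalized
-- string produced by joining the split words with single spaces, instead of A's loop accumulating word lengths (alternative algorithm, same cost).

-- ===== PORT A =====
def get_word_indices (text : String) : List (Int × Int) :=
  let words := PySem.Str.split₀ text
  (words.foldl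
    (fun (st : List (Int × Int) × Int) word =>
      (st.1 ++ [(st.2, st.2 + PySem.Str.len word)], st.2 + PySem.Str.len word + 1))
    ([], 0)).1

-- ===== PORT B =====
/-- One step of Source B's scan loop over `enumerate(joined)`: state = (indices, start). -/
def scanStep (st : List (Int × Int) × Option Int) (ic : Int × Char) : List (Int × Int) × Option Int :=
  if ic.2 ≠ ' ' then
    match st.2 with
    | none => (st.1, some ic.1)
    | some _ => st
  else
    match st.2 with
    | some s0 => (st.1 ++ [(s0, ic.1)], none)
    | none => st

/-- Source B's final flush: `if start is not None: indices.append((start, len(joined)))`. -/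
def scanFin (st : List (Int × Int) × Option Int) (e : Int) : List (Int × Int) :=
  match st.2 with
  | some s0 => st.1 ++ [(s0, e)]
  | none => st.1

def get_word_indices_alt (text : String) : List (Int × Int) :=
  let joined := PySem.Str.join " " (PySem.Str.split₀ text)
  scanFin ((PySem.List.enumerate joined.toList 0).foldl scanStep ([], none)) (PySem.Str.len joined)

-- ===== PRECONDITION & SPEC =====
def Spec_get_word_indices (text : String) (out : List (Int × Int)) : Prop := out = get_word_indices_alt text
instance (text : String) (out : List (Int × Int)) : Decidable (Spec_get_word_indices text out) := by unfold Spec_get_word_indices; infer_instance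

-- ===== CLAIM (what is proved, stated in full; the proofs are below) =====
def Claim_equal_get_word_indices : Prop := ∀ (text : String), Dom_get_word_indices text → Spec_get_word_indices text (get_word_indices text)

-- ===== LEMMAS AND PROOFS =====

/-- Reference: the pairs produced from a list of word lengths starting at `off`. -/
def ggIdx : List Int → Int → List (Int × Int)
  | [], _ => []
  | n :: ns, off => (off, off + n) :: ggIdx ns (off + n + 1)

lemma lemA (ws : List String) : ∀ (acc : List (Int × Int)) (off : Int),
    (ws.foldl
      (fun (st : List (Int × Int) × Int) word =>
        (st.1 ++ [(st.2, st.2 + PySem.Str.len word)], st.2 + PySem.Str.len word + 1))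
      (acc, off)).1 = acc ++ ggIdx (ws.map (fun w => PySem.Str.len w)) off := by
  induction ws with
  | nil => intro acc off; simp [ggIdx]
  | cons w ws ih =>
      intro acc off
      simp only [List.foldl_cons, List.map_cons, ggIdx]
      rw [ih]
      simp

/-- Every piece of Python's `s.split()` is nonempty and whitespace-free (invariant of go). -/
lemma go_words (s : List Char) : ∀ (cur : List Char) (acc : List (List Char)),
    (∀ c ∈ cur, PySem.Chars.isspace c = false) →
    (∀ w ∈ acc, w ≠ [] ∧ ∀ c ∈ w, PySem.Chars.isspace c = false) →
    ∀ w ∈ PySem.Chars.split₀.go s cur acc, w ≠ [] ∧ ∀ c ∈ w, PySem.Chars.isspace c = false := by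
  induction s with
  | nil =>
      intro cur acc hcur hacc w hw
      rw [PySem.Chars.split₀.go.eq_def] at hw
      by_cases h : cur.isEmpty = true
      · simp [h] at hw; exact hacc w hw
      · simp [h] at hw
        rcases hw with hw | hw
        · exact hacc w hw
        · subst hw
          constructor
          · simp [List.isEmpty_iff] at h ⊢; exact h
          · intro c hc; exact hcur c (List.mem_reverse.mp hc)
  | cons c rest ih =>
      intro cur acc hcur hacc w hw
      rw [PySem.Chars.split₀.go.eq_def] at hw
      by_cases hsp : PySem.Chars.isspace c = true
      · by_cases h : cur.isEmpty = true
        · simp [hsp, h] at hw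
          exact ih [] acc (by simp) hacc w hw
        · simp [hsp, h] at hw
          refine ih [] (cur.reverse :: acc) (by simp) ?_ w hw
          intro v hv
          rcases List.mem_cons.mp hv with hv | hv
          · subst hv
            exact ⟨by simp [List.isEmpty_iff] at h ⊢; exact h,
                   fun d hd => hcur d (List.mem_reverse.mp hd)⟩
          · exact hacc v hv
      · simp [hsp] at hw
        refine ih (c :: cur) acc ?_ hacc w hw
        intro d hd
        rcases List.mem_cons.mp hd with hd | hd
        · subst hd; simpa using hsp
        · exact hcur d hd

lemma split₀_words (s : List Char) :
    ∀ w ∈ PySem.Chars.split₀ s, w ≠ [] ∧ ∀ c ∈ w, PySem.Chars.isspace c = false := by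
  have : PySem.Chars.split₀ s = PySem.Chars.split₀.go s [] [] := rfl
  rw [this]
  exact go_words s [] [] (by simp) (by simp)

/-- Scanning non-space characters with the start already set changes nothing. -/
lemma scan_inword (w : List Char) : ∀ (i s0 : Int) (acc : List (Int × Int)),
    (∀ c ∈ w, c ≠ ' ') →
    (PySem.List.enumerate w i).foldl scanStep (acc, some s0) = (acc, some s0) := by
  induction w with
  | nil => intro i s0 acc _; simp [PySem.List.enumerate_nil]
  | cons c rest ih =>
      intro i s0 acc h
      rw [PySem.List.enumerate_cons, List.foldl_cons]
      have hc : c ≠ ' ' := h c (by simp)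
      simp only [scanStep, if_pos hc]
      exact ih (i + 1) s0 acc (fun d hd => h d (by simp [hd]))

/-- Scanning a nonempty space-free word from start=None records the start and stays inside it. -/
lemma scan_word (w : List Char) (i : Int) (acc : List (Int × Int))
    (hne : w ≠ []) (hw : ∀ c ∈ w, c ≠ ' ') :
    (PySem.List.enumerate w i).foldl scanStep (acc, none) = (acc, some i) := by
  cases w with
  | nil => exact absurd rfl hne
  | cons c rest =>
      rw [PySem.List.enumerate_cons, List.foldl_cons]
      have hc : c ≠ ' ' := hw c (by simp)
      simp only [scanStep, if_pos hc]
      exact scan_inword rest (i + 1) i acc (fun d hd => hw d (by simp [hd]))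

/-- Main scan characterization: scanning the single-space join of nonempty space-free
    words, flushed at the end offset, yields exactly the offset/length index pairs. -/
lemma scan_join (ws : List (List Char)) :
    (∀ w ∈ ws, w ≠ [] ∧ ∀ c ∈ w, c ≠ ' ') →
    ∀ (i : Int) (acc : List (Int × Int)),
    scanFin ((PySem.List.enumerate (PySem.Chars.join [' '] ws) i).foldl scanStep (acc, none))
        (i + ((PySem.Chars.join [' '] ws).length : Int))
      = acc ++ ggIdx (ws.map (fun w => (w.length : Int))) i := by
  induction ws with
  | nil =>
      intro _ i acc
      simp [PySem.Chars.join_nil, PySem.List.enumerate_nil, scanFin, ggIdx]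
  | cons w ws ih =>
      intro h i acc
      obtain ⟨hne, hfree⟩ := h w (by simp)
      cases ws with
      | nil =>
          rw [PySem.Chars.join_singleton, scan_word w i acc hne hfree]
          simp [scanFin, ggIdx]
      | cons v vs =>
          rw [PySem.Chars.join_cons_cons]
          rw [List.append_assoc, PySem.List.enumerate_append, List.foldl_append,
              scan_word w i acc hne hfree]
          rw [List.cons_append, List.nil_append, PySem.List.enumerate_cons, List.foldl_cons]
          have hstep : scanStep (acc, some i) (i + ↑w.length, ' ')
              = (acc ++ [(i, i + ↑w.length)], none) := by
            simp [scanStep]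
          rw [hstep]
          have hend : i + ((w ++ ' ' :: PySem.Chars.join [' '] (v :: vs)).length : Int)
              = (i + ↑w.length + 1) + ((PySem.Chars.join [' '] (v :: vs)).length : Int) := by
            simp; ring
          rw [hend, ih (fun u hu => h u (by simp [hu])) (i + ↑w.length + 1)
                (acc ++ [(i, i + ↑w.length)])]
          simp [ggIdx]

-- ===== VERDICT (by name: the statement is the Claim_ definition above) =====
theorem get_word_indices_spec : Claim_equal_get_word_indices := by
  intro text _
  simp only [Spec_get_word_indices, get_word_indices, get_word_indices_alt]
  rw [lemA]
  have hsep : (" " : String).toList = [' '] := rfl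
  have hjoin : (PySem.Str.join " " (PySem.Str.split₀ text)).toList
      = PySem.Chars.join [' '] ((PySem.Str.split₀ text).map String.toList) := by
    rw [PySem.Str.toList_join, hsep]
  have hwords : ∀ w ∈ (PySem.Str.split₀ text).map String.toList, w ≠ [] ∧ ∀ c ∈ w, c ≠ ' ' := by
    intro w hw
    rw [PySem.Str.split₀_map_toList] at hw
    obtain ⟨hne, hfree⟩ := split₀_words text.toList w hw
    refine ⟨hne, fun c hc hceq => ?_⟩
    have := hfree c hc
    subst hceq
    simp [show PySem.Chars.isspace ' ' = true from by decide] at this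
  have hlen : PySem.Str.len (PySem.Str.join " " (PySem.Str.split₀ text))
      = 0 + ((PySem.Chars.join [' '] ((PySem.Str.split₀ text).map String.toList)).length : Int) := by
    rw [PySem.Str.len_eq, hjoin]; ring
  rw [hjoin, hlen, scan_join _ hwords 0 []]
  have hmap : (PySem.Str.split₀ text).map (fun w => PySem.Str.len w)
      = ((PySem.Str.split₀ text).map String.toList).map (fun w => (w.length : Int)) := by
    rw [List.map_map]
    exact List.map_congr_left (fun w _ => PySem.Str.len_eq w)
  rw [hmap, List.nil_append]
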